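-- pv_equiv track=rewrite | github.com/Marques-079/Advent-of-Code-2024---No-imports | day-03/q-3b.py | find_muls
-- ===== SOURCE A (Python) =====
-- def muls_present(sub):
--     i = 4
--     num1 = ""
--     while i < len(sub) and sub[i].isdigit():
--         num1 += sub[i]
--         i += 1
--         if len(num1) > 3:
--             return 0
--
--     if i >= len(sub) or sub[i] != ',' or num1 == "":
--         return 0
--
--     i += 1
--     num2 = ""
--     while i < len(sub) and sub[i].isdigit():
--         num2 += sub[i]
--         i += 1
--         if len(num2) > 3:
--             return 0
--
--     if i >= len(sub) or sub[i] != ')' or num2 == "":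
--         return 0
--
--     return int(num1) * int(num2)
--
-- def find_muls(text):
--     collection = 0
--     Active = True  #Only difference from prior code is the Active Toggle whether to account for the muls or not
--     for i in range(len(text)):
--         if text[i:i+7] == "don't()":
--             Active = False
--         elif text[i:i+4] == "do()":
--             Active = True
--         else:
--             pass
--
--         if text[i:i+4] == 'mul(' and Active:
--             result = muls_present(text[i:i+15])
--             collection += result
--     return collection
-- ===== SOURCE B (Python) =====
-- def find_muls(text):
--     # Single left-to-right tokenizing scan: match a whole token (do()/don't()/mul(a,b))
--     # at the current position and skip past it, instead of re-checking slices at every index.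
--     n = len(text)
--     total = 0
--     active = True
--     i = 0
--     while i < n:
--         if text.startswith("don't()", i):
--             active = False
--             i += 7
--         elif text.startswith("do()", i):
--             active = True
--             i += 4
--         elif text.startswith("mul(", i):
--             j = i + 4
--             d1 = 0
--             while j + d1 < n and text[j + d1].isdigit():
--                 d1 += 1
--             k = j + d1
--             if 1 <= d1 <= 3 and k < n and text[k] == ',':
--                 j2 = k + 1
--                 d2 = 0
--                 while j2 + d2 < n and text[j2 + d2].isdigit():
--                     d2 += 1
--                 m = j2 + d2
--                 if 1 <= d2 <= 3 and m < n and text[m] == ')':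
--                     if active:
--                         total += int(text[j:k]) * int(text[j2:m])
--                     i = m + 1
--                 else:
--                     i += 1
--             else:
--                 i += 1
--         else:
--             i += 1
--     return total
-- ===== Notes on version B (the rewrite author's own statement) =====
-- stated objective: alternative
-- what changed: A checks every index with three slice comparisons plus a slicing helper call; B is a tokenizing scanner that matches a whole do()/don't()/mul(a,b) token at the current position and jumps past it, parsing digit runs in place without building slices.
import Mathlib
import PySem

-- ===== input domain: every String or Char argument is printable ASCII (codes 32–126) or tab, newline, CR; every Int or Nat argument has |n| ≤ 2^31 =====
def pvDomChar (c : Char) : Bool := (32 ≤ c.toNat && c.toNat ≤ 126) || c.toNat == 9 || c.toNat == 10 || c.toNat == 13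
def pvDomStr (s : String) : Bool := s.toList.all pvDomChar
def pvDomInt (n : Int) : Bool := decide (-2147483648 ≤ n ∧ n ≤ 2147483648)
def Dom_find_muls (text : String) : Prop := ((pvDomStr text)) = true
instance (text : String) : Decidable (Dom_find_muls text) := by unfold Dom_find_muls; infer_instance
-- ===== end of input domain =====

set_option maxRecDepth 4096


-- B replaces A's check-every-index loop (three slice comparisons plus a slicing helper call
-- per character) by a single tokenizing scan that matches a whole do()/don't()/mul(a,b)
-- token at the current position and skips past it; objective: alternative/simpler traversal.

-- ===== PORT A =====
-- A's inner while loop: walks the remaining characters (sub[i], sub[i+1], …), keeping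
-- Python's index i and the accumulated digit string num; sub[i].isdigit() is Char.isDigit
-- (exact on this task's printable-ASCII domain).
def mpScan (rem : List Char) (i : Nat) (num : List Char) : Option (Nat × List Char) :=
  match rem with
  | [] => some (i, num)
  | c :: r =>
    if c.isDigit then
      if 3 < (num ++ [c]).length then none
      else mpScan r (i+1) (num ++ [c])
    else some (i, num)

def muls_present (sub : List Char) : Int :=
  match mpScan (sub.drop 4) 4 [] with
  | none => 0
  | some (i1, num1) =>
    if sub.length ≤ i1 ∨ sub[i1]? ≠ some ',' ∨ num1 = [] then 0
    else
      match mpScan (sub.drop (i1+1)) (i1+1) [] with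
      | none => 0
      | some (i2, num2) =>
        if sub.length ≤ i2 ∨ sub[i2]? ≠ some ')' ∨ num2 = [] then 0
        else
          -- int(num1) * int(num2): here num1/num2 are nonempty digit runs, so int() cannot raise
          ((PySem.Int.ofChars? num1).getD 0) * ((PySem.Int.ofChars? num2).getD 0)

def find_muls (text : String) : Int :=
  let s := text.toList
  ((PySem.List.pyRange 0 (s.length : Int) 1).foldl
    (fun st i =>
      let active :=
        if PySem.List.slice s (some i) (some (i+7)) = "don't()".toList then false
        else if PySem.List.slice s (some i) (some (i+4)) = "do()".toList then true
        else st.1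
      if PySem.List.slice s (some i) (some (i+4)) = "mul(".toList ∧ active = true then
        (active, st.2 + muls_present (PySem.List.slice s (some i) (some (i+15))))
      else (active, st.2))
    (true, 0)).2

-- ===== PORT B =====
-- B's digit-run counter (the inner `while … .isdigit(): d += 1` loops of Source B)
def digitCount (u : List Char) : Nat :=
  match u with
  | [] => 0
  | c :: r => if c.isDigit then digitCount r + 1 else 0

-- B's "mul(" branch on the characters after "mul(": on a full match returns the product
-- and the number of characters consumed after "mul(" (= d1 + 1 + d2 + 1)
def mulArm? (t4 : List Char) : Option (Int × Nat) :=
  let d1 := digitCount t4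
  if 1 ≤ d1 ∧ d1 ≤ 3 ∧ t4[d1]? = some ',' then
    let rest := t4.drop (d1+1)
    let d2 := digitCount rest
    if 1 ≤ d2 ∧ d2 ≤ 3 ∧ rest[d2]? = some ')' then
      some (((PySem.Int.ofChars? (t4.take d1)).getD 0) * ((PySem.Int.ofChars? (rest.take d2)).getD 0),
            d1 + 1 + d2 + 1)
    else none
  else none

-- Source B's main while loop; fuel = length of the remaining text bounds the iteration count
-- (the scan consumes at least one character per step), making the recursion structural
def scanB (fuel : Nat) (t : List Char) (active : Bool) (total : Int) : Int :=
  match fuel, t with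
  | 0, _ => total
  | _, [] => total
  | fuel + 1, c :: r =>
    if "don't()".toList.isPrefixOf (c :: r) then scanB fuel ((c :: r).drop 7) false total
    else if "do()".toList.isPrefixOf (c :: r) then scanB fuel ((c :: r).drop 4) true total
    else if "mul(".toList.isPrefixOf (c :: r) then
      match mulArm? ((c :: r).drop 4) with
      | some (p, len) => scanB fuel ((c :: r).drop (4 + len)) active (if active then total + p else total)
      | none => scanB fuel r active total
    else scanB fuel r active total

def find_muls_alt (text : String) : Int := scanB text.toList.length text.toList true 0

-- ===== PRECONDITION & SPEC =====
def Spec_find_muls (text : String) (out : Int) : Prop := out = find_muls_alt text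
instance (text : String) (out : Int) : Decidable (Spec_find_muls text out) := by unfold Spec_find_muls; infer_instance

-- ===== CLAIM (what is proved, stated in full; the proofs are below) =====
def Claim_equal_find_muls : Prop := ∀ (text : String), Dom_find_muls text → Spec_find_muls text (find_muls text)

-- ===== LEMMAS AND PROOFS =====

-- A's loop body at Nat index j, with the slices text[j:j+…] written as drop/take
def stepN (s : List Char) (st : Bool × Int) (j : Nat) : Bool × Int :=
  let active :=
    if (s.drop j).take 7 = "don't()".toList then false
    else if (s.drop j).take 4 = "do()".toList then true
    else st.1
  if (s.drop j).take 4 = "mul(".toList ∧ active = true then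
    (active, st.2 + muls_present ((s.drop j).take 15))
  else (active, st.2)

lemma digitCount_eq (u : List Char) : digitCount u = (u.takeWhile Char.isDigit).length := by
  induction u with
  | nil => rfl
  | cons c r ih => by_cases h : c.isDigit <;> simp [digitCount, h, ih, List.takeWhile_cons]

lemma mpScan_eq (rem : List Char) : ∀ (i : Nat) (num : List Char), num.length ≤ 3 →
    mpScan rem i num =
      (if 3 < num.length + (rem.takeWhile Char.isDigit).length then none
       else some (i + (rem.takeWhile Char.isDigit).length, num ++ rem.takeWhile Char.isDigit)) := by
  induction rem with
  | nil => intro i num h; simp [mpScan]; omega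
  | cons c r ih =>
    intro i num h
    by_cases hc : c.isDigit
    · rw [mpScan, if_pos hc, List.takeWhile_cons, if_pos hc]
      by_cases hA : 3 < (num ++ [c]).length
      · rw [if_pos hA, if_pos (by simp at hA ⊢; omega)]
      · rw [if_neg hA, ih (i+1) (num ++ [c]) (by simp at hA ⊢; omega)]
        by_cases h5 : 3 < (num ++ [c]).length + (List.takeWhile Char.isDigit r).length
        · rw [if_pos h5, if_pos (by simp at h5 ⊢; omega)]
        · rw [if_neg h5, if_neg (by simp at h5 ⊢; omega)]
          simp
          omega
    · rw [mpScan, if_neg hc, List.takeWhile_cons, if_neg hc,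
          if_neg (by simp; omega)]
      simp

lemma take_takeWhile_length (l : List Char) (p : Char → Bool) :
    l.take (l.takeWhile p).length = l.takeWhile p := by
  induction l with
  | nil => simp
  | cons c r ih => by_cases h : p c <;> simp [List.takeWhile_cons, h, ih]

lemma isDigit_not_dm {c : Char} (h : c.isDigit = true) : c ≠ 'd' ∧ c ≠ 'm' := by
  constructor <;> rintro rfl <;> simp at h


lemma getElem?_cons4 {α : Type} (a b c e : α) (l : List α) (k : Nat) :
    (a::b::c::e::l)[k+4]? = l[k]? := by
  rw [show k+4 = (((k+1)+1)+1)+1 from rfl]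
  simp [List.getElem?_cons_succ]

lemma drop_cons4 {α : Type} (a b c e : α) (l : List α) (k : Nat) :
    (a::b::c::e::l).drop (k+4) = l.drop k := by
  rw [show k+4 = (((k+1)+1)+1)+1 from rfl]
  simp [List.drop_succ_cons]

-- the key value lemma: A's muls_present on text[i:i+15] computes exactly B's mulArm? product
lemma MP (t4 : List Char) :
    muls_present ('m'::'u'::'l'::'('::(t4.take 11)) =
      (match mulArm? t4 with | some pl => pl.1 | none => 0) := by
  unfold muls_present mulArm?
  dsimp only
  rw [show ('m'::'u'::'l'::'('::(t4.take 11)).drop 4 = t4.take 11 from rfl,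
      mpScan_eq _ 4 [] (by simp), ← List.take_takeWhile, digitCount_eq]
  set R := t4.takeWhile Char.isDigit with hR
  simp only [List.length_nil, List.nil_append, Nat.zero_add]
  by_cases hd3 : 3 < R.length
  · rw [if_pos (show 3 < (R.take 11).length from by rw [List.length_take]; omega),
        if_neg (show ¬(1 ≤ R.length ∧ R.length ≤ 3 ∧ t4[R.length]? = some ',') from by
          rintro ⟨-, h2, -⟩; omega)]
  · push_neg at hd3
    rw [if_neg (show ¬ 3 < (R.take 11).length from by rw [List.length_take]; omega),
        List.take_of_length_le (show R.length ≤ 11 by omega)]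
    dsimp only
    have hidx1 : ('m'::'u'::'l'::'('::(t4.take 11))[4 + R.length]? = t4[R.length]? := by
      rw [Nat.add_comm, getElem?_cons4, List.getElem?_take, if_pos (by omega)]
    by_cases hC1 : t4[R.length]? = some ',' ∧ R ≠ []
    · obtain ⟨hcomma, hRne⟩ := hC1
      have hR1 : 1 ≤ R.length := List.length_pos_iff.mpr hRne
      have hdlt : R.length < t4.length := by
        by_contra hh
        push_neg at hh
        rw [List.getElem?_eq_none (by omega)] at hcomma
        cases hcomma
      rw [if_neg (show ¬(('m'::'u'::'l'::'('::(t4.take 11)).length ≤ 4 + R.length ∨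
            ('m'::'u'::'l'::'('::(t4.take 11))[4 + R.length]? ≠ some ',' ∨ R = []) from by
          push_neg
          refine ⟨by simp only [List.length_cons, List.length_take]; omega, ?_, hRne⟩
          rw [hidx1]; exact hcomma),
          if_pos (show 1 ≤ R.length ∧ R.length ≤ 3 ∧ t4[R.length]? = some ',' from
            ⟨hR1, by omega, hcomma⟩)]
      rw [show ('m'::'u'::'l'::'('::(t4.take 11)).drop (4 + R.length + 1) =
            (t4.drop (R.length+1)).take (10 - R.length) from by
          rw [show 4 + R.length + 1 = (R.length+1)+4 from by omega, drop_cons4, List.drop_take,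
              show 11 - (R.length+1) = 10 - R.length from by omega],
          mpScan_eq _ _ [] (by simp), ← List.take_takeWhile, digitCount_eq]
      set R2 := (t4.drop (R.length + 1)).takeWhile Char.isDigit with hR2
      simp only [List.length_nil, List.nil_append, Nat.zero_add]
      by_cases he2 : 3 < R2.length
      · rw [if_pos (show 3 < (R2.take (10 - R.length)).length from by
              rw [List.length_take]; omega),
            if_neg (show ¬(1 ≤ R2.length ∧ R2.length ≤ 3 ∧
              (t4.drop (R.length+1))[R2.length]? = some ')') from by rintro ⟨-, h2, -⟩; omega)]
      · push_neg at he2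
        rw [if_neg (show ¬ 3 < (R2.take (10 - R.length)).length from by
              rw [List.length_take]; omega),
            List.take_of_length_le (show R2.length ≤ 10 - R.length by omega)]
        dsimp only
        have hidx2 : ('m'::'u'::'l'::'('::(t4.take 11))[4 + R.length + 1 + R2.length]? =
            (t4.drop (R.length+1))[R2.length]? := by
          rw [show 4 + R.length + 1 + R2.length = (R.length + 1 + R2.length)+4 from by omega,
              getElem?_cons4, List.getElem?_take, if_pos (by omega), List.getElem?_drop]
        by_cases hC2 : (t4.drop (R.length+1))[R2.length]? = some ')' ∧ R2 ≠ []
        · obtain ⟨hparen, hR2ne⟩ := hC2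
          have hR21 : 1 ≤ R2.length := List.length_pos_iff.mpr hR2ne
          have hdlt2 : R2.length < (t4.drop (R.length+1)).length := by
            by_contra hh
            push_neg at hh
            rw [List.getElem?_eq_none (by omega)] at hparen
            cases hparen
          rw [List.length_drop] at hdlt2
          rw [if_neg (show ¬(('m'::'u'::'l'::'('::(t4.take 11)).length ≤ 4 + R.length + 1 + R2.length ∨
                ('m'::'u'::'l'::'('::(t4.take 11))[4 + R.length + 1 + R2.length]? ≠ some ')' ∨
                R2 = []) from by
              push_neg
              refine ⟨by simp only [List.length_cons, List.length_take]; omega, ?_, hR2ne⟩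
              rw [hidx2]; exact hparen),
            if_pos (show 1 ≤ R2.length ∧ R2.length ≤ 3 ∧
                (t4.drop (R.length+1))[R2.length]? = some ')' from ⟨hR21, by omega, hparen⟩)]
          rw [show t4.take R.length = R from by
                rw [hR]; exact take_takeWhile_length t4 Char.isDigit,
              show (t4.drop (R.length+1)).take R2.length = R2 from by
                rw [hR2]; exact take_takeWhile_length _ Char.isDigit]
        · rw [if_pos (show (('m'::'u'::'l'::'('::(t4.take 11)).length ≤ 4 + R.length + 1 + R2.length ∨
                ('m'::'u'::'l'::'('::(t4.take 11))[4 + R.length + 1 + R2.length]? ≠ some ')' ∨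
                R2 = []) from by
              by_cases hz : R2 = []
              · exact Or.inr (Or.inr hz)
              · refine Or.inr (Or.inl ?_)
                rw [hidx2]
                intro hcontr
                exact hC2 ⟨hcontr, hz⟩),
            if_neg (show ¬(1 ≤ R2.length ∧ R2.length ≤ 3 ∧
                (t4.drop (R.length+1))[R2.length]? = some ')') from by
              rintro ⟨h1', -, h3'⟩
              exact hC2 ⟨h3', by intro hz; rw [hz] at h1'; simp at h1'⟩)]
    · rw [if_pos (show (('m'::'u'::'l'::'('::(t4.take 11)).length ≤ 4 + R.length ∨
            ('m'::'u'::'l'::'('::(t4.take 11))[4 + R.length]? ≠ some ',' ∨ R = []) from by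
          by_cases hz : R = []
          · exact Or.inr (Or.inr hz)
          · refine Or.inr (Or.inl ?_)
            rw [hidx1]
            intro hcontr
            exact hC1 ⟨hcontr, hz⟩),
        if_neg (show ¬(1 ≤ R.length ∧ R.length ≤ 3 ∧ t4[R.length]? = some ',') from by
          rintro ⟨h1', -, h3'⟩
          exact hC1 ⟨h3', by intro hz; rw [hz] at h1'; simp at h1'⟩)]

-- characters strictly inside a matched mul token are never 'd' or 'm'
lemma mulSpan_safe {t4 : List Char} {p : Int} {len : Nat} (h : mulArm? t4 = some (p, len)) :
    ∀ off c, off < len → t4[off]? = some c → c ≠ 'd' ∧ c ≠ 'm' := by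
  unfold mulArm? at h
  dsimp only at h
  rw [digitCount_eq] at h
  set R := t4.takeWhile Char.isDigit with hR
  rw [digitCount_eq] at h
  set R2 := (t4.drop (R.length+1)).takeWhile Char.isDigit with hR2
  split_ifs at h with h1 h2
  · obtain ⟨h1a, h1b, h1c⟩ := h1
    obtain ⟨h2a, h2b, h2c⟩ := h2
    simp only [Option.some.injEq, Prod.mk.injEq] at h
    obtain ⟨-, hlen2⟩ := h
    subst hlen2
    intro off c hoff hget
    have hteq : t4.take R.length = R := by
      rw [hR]; exact take_takeWhile_length t4 Char.isDigit
    have hteq2 : (t4.drop (R.length+1)).take R2.length = R2 := by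
      rw [hR2]; exact take_takeWhile_length _ Char.isDigit
    rcases lt_trichotomy off R.length with hlt | heq | hgt
    · have ht : t4[off]? = R[off]? := by
        rw [← hteq, List.getElem?_take, if_pos hlt]
      have hmem : c ∈ R := List.mem_of_getElem? (ht ▸ hget)
      rw [hR] at hmem
      exact isDigit_not_dm (List.mem_takeWhile_imp hmem)
    · rw [heq, h1c] at hget
      injection hget with hc
      subst hc
      exact ⟨by decide, by decide⟩
    · have hoff2 : off - (R.length+1) ≤ R2.length := by omega
      have hsplit : t4[off]? = (t4.drop (R.length+1))[off - (R.length+1)]? := by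
        rw [List.getElem?_drop, show R.length + 1 + (off - (R.length+1)) = off from by omega]
      rcases lt_or_eq_of_le hoff2 with hlt2 | heq2
      · have ht : t4[off]? = R2[off - (R.length+1)]? := by
          rw [hsplit, ← hteq2, List.getElem?_take, if_pos hlt2]
        have hmem : c ∈ R2 := List.mem_of_getElem? (ht ▸ hget)
        rw [hR2] at hmem
        exact isDigit_not_dm (List.mem_takeWhile_imp hmem)
      · rw [hsplit, heq2, h2c] at hget
        injection hget with hc
        subst hc
        exact ⟨by decide, by decide⟩

lemma mulArm_len {t4 : List Char} {p : Int} {len : Nat} (h : mulArm? t4 = some (p, len)) :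
    len ≤ t4.length ∧ 1 ≤ len := by
  unfold mulArm? at h
  dsimp only at h
  rw [digitCount_eq] at h
  set R := t4.takeWhile Char.isDigit with hR
  rw [digitCount_eq] at h
  set R2 := (t4.drop (R.length+1)).takeWhile Char.isDigit with hR2
  split_ifs at h with h1 h2
  · obtain ⟨h1a, h1b, h1c⟩ := h1
    obtain ⟨h2a, h2b, h2c⟩ := h2
    simp only [Option.some.injEq, Prod.mk.injEq] at h
    obtain ⟨-, hlen2⟩ := h
    have hdlt2 : R2.length < (t4.drop (R.length+1)).length := by
      by_contra hh
      push_neg at hh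
      rw [List.getElem?_eq_none (by omega)] at h2c
      cases h2c
    rw [List.length_drop] at hdlt2
    omega

lemma span_safe_append (hd : Char) (tl u : List Char)
    (hsafe : ∀ x ∈ tl, x ≠ 'd' ∧ x ≠ 'm') :
    ∀ off c, 1 ≤ off → off < tl.length + 1 → ((hd :: tl) ++ u)[off]? = some c →
      c ≠ 'd' ∧ c ≠ 'm' := by
  intro off c h1 hlt hc
  obtain ⟨off', rfl⟩ : ∃ o, off = o + 1 := ⟨off - 1, by omega⟩
  rw [List.cons_append, List.getElem?_cons_succ, List.getElem?_append_left (by omega)] at hc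
  exact hsafe c (List.mem_of_getElem? hc)

lemma tokDont_eq : "don't()".toList = ['d','o','n','\'','t','(',')'] := rfl
lemma tokDo_eq : "do()".toList = ['d','o','(',')'] := rfl
lemma tokMul_eq : "mul(".toList = ['m','u','l','('] := rfl

lemma stepN_id (s : List Char) (st : Bool × Int) (j : Nat)
    (h : ∀ c, s[j]? = some c → c ≠ 'd' ∧ c ≠ 'm') : stepN s st j = st := by
  rcases hg : s[j]? with _ | c
  · have hlen : s.length ≤ j := List.getElem?_eq_none_iff.mp hg
    have hdrop : s.drop j = [] := List.drop_eq_nil_of_le hlen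
    simp [stepN, hdrop, tokDont_eq, tokDo_eq, tokMul_eq]
  · obtain ⟨hlt, hEl⟩ := List.getElem?_eq_some_iff.mp hg
    obtain ⟨hdc, hmc⟩ := h c hg
    have hdrop : s.drop j = c :: s.drop (j+1) := by rw [List.drop_eq_getElem_cons hlt, hEl]
    have e7 : (s.drop j).take 7 = c :: (s.drop (j+1)).take 6 := by
      rw [hdrop, show (7:Nat) = 6+1 from rfl, List.take_succ_cons]
    have e4 : (s.drop j).take 4 = c :: (s.drop (j+1)).take 3 := by
      rw [hdrop, show (4:Nat) = 3+1 from rfl, List.take_succ_cons]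
    simp [stepN, e7, e4, tokDont_eq, tokDo_eq, tokMul_eq, hdc, hmc]

lemma foldl_stepN_id (s : List Char) : ∀ (L i : Nat),
    (∀ j, j ∈ List.range' i L → ∀ c, s[j]? = some c → c ≠ 'd' ∧ c ≠ 'm') →
    ∀ st, List.foldl (stepN s) st (List.range' i L) = st := by
  intro L
  induction L with
  | zero => simp
  | succ L ih =>
    intro i h st
    rw [List.range'_succ, List.foldl_cons,
        stepN_id s st i (h i (by rw [List.range'_succ]; exact List.mem_cons_self ..)),
        ih (i+1) (fun j hj => h j (by rw [List.range'_succ]; exact List.mem_cons_of_mem _ hj))]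

lemma scanB_nil (fuel : Nat) (a : Bool) (c : Int) : scanB fuel [] a c = c := by
  cases fuel <;> rfl

lemma fold_span_id (s : List Char) (i m : Nat)
    (h : ∀ off c, 1 ≤ off → off < m + 1 → (s.drop i)[off]? = some c → c ≠ 'd' ∧ c ≠ 'm')
    (st : Bool × Int) : List.foldl (stepN s) st (List.range' (i+1) m) = st := by
  apply foldl_stepN_id
  intro j hj c hc
  rw [List.mem_range'_1] at hj
  have hrw : s[j]? = (s.drop i)[j - i]? := by
    rw [List.getElem?_drop, Nat.add_sub_cancel' (by omega)]
  exact h (j - i) c (by omega) (by omega) (hrw ▸ hc)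

-- the main loop correspondence: A's fold over indices [i, i+k) equals B's scan of s.drop i
lemma scan_fold (s : List Char) : ∀ (k : Nat), ∀ (fuel i : Nat) (a : Bool) (c : Int),
    s.length = i + k → k ≤ fuel →
    (List.foldl (stepN s) (a, c) (List.range' i k)).2 = scanB fuel (s.drop i) a c := by
  intro k
  induction k using Nat.strong_induction_on with
  | _ k ih =>
    intro fuel i a c hlen hfuel
    rcases k with _ | k'
    · rw [List.drop_eq_nil_of_le (by omega), scanB_nil]
      rfl
    · rcases fuel with _ | f'
      · omega
      have hi : i < s.length := by omega
      have hlenT : (s.drop i).length = k' + 1 := by rw [List.length_drop]; omega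
      by_cases hb1 : "don't()".toList.isPrefixOf (s.drop i) = true
      · obtain ⟨u, hu⟩ := List.isPrefixOf_iff_prefix.mp hb1
        have hc7 : s.drop i = 'd'::'o'::'n'::'\''::'t'::'('::')'::u := by rw [← hu]; rfl
        have hulen : u.length + 7 = k' + 1 := by rw [hc7] at hlenT; simpa using hlenT
        have hu7 : u = s.drop (i+7) := by rw [← List.drop_drop, hc7]; rfl
        have h1 : (s.drop i).take 7 = "don't()".toList := by rw [hc7]; rfl
        have h4 : (s.drop i).take 4 = ['d','o','n','\''] := by rw [hc7]; rfl
        have hstep : stepN s (a, c) i = (false, c) := by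
          simp [stepN, h1, h4, tokDont_eq, tokDo_eq, tokMul_eq]
        rw [show k'+1 = 7 + (k'+1-7) from by omega, ← List.range'_append, one_mul,
            List.foldl_append, show List.range' i 7 = i :: List.range' (i+1) 6 from rfl,
            List.foldl_cons, hstep,
            fold_span_id s i 6 (by
              intro off cc ho1 ho2 hcc
              rw [hc7] at hcc
              exact span_safe_append 'd' ['o','n','\'','t','(',')'] u
                (by intro x hx; simp at hx; rcases hx with rfl|rfl|rfl|rfl|rfl|rfl <;>
                      exact ⟨by decide, by decide⟩) off cc ho1 ho2 hcc),
            ih (k'+1-7) (by omega) f' (i+7) false c (by omega) (by omega)]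
        rw [hc7]
        simp only [scanB]
        rw [if_pos (show "don't()".toList.isPrefixOf ('d'::'o'::'n'::'\''::'t'::'('::')'::u) = true
              from by rw [← hc7]; exact hb1),
            show ('d'::'o'::'n'::'\''::'t'::'('::')'::u).drop 7 = u from rfl, hu7]
      · by_cases hb2 : "do()".toList.isPrefixOf (s.drop i) = true
        · obtain ⟨u, hu⟩ := List.isPrefixOf_iff_prefix.mp hb2
          have hc4 : s.drop i = 'd'::'o'::'('::')'::u := by rw [← hu]; rfl
          have hulen : u.length + 4 = k' + 1 := by rw [hc4] at hlenT; simpa using hlenT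
          have hu4 : u = s.drop (i+4) := by rw [← List.drop_drop, hc4]; rfl
          have h7 : (s.drop i).take 7 = 'd'::'o'::'('::')'::(u.take 3) := by rw [hc4]; rfl
          have h4 : (s.drop i).take 4 = "do()".toList := by rw [hc4]; rfl
          have hstep : stepN s (a, c) i = (true, c) := by
            simp [stepN, h7, h4, tokDont_eq, tokDo_eq, tokMul_eq]
          rw [show k'+1 = 4 + (k'+1-4) from by omega, ← List.range'_append, one_mul,
              List.foldl_append, show List.range' i 4 = i :: List.range' (i+1) 3 from rfl,
              List.foldl_cons, hstep,
              fold_span_id s i 3 (by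
                intro off cc ho1 ho2 hcc
                rw [hc4] at hcc
                exact span_safe_append 'd' ['o','(',')'] u
                  (by intro x hx; simp at hx; rcases hx with rfl|rfl|rfl <;>
                        exact ⟨by decide, by decide⟩) off cc ho1 ho2 hcc),
              ih (k'+1-4) (by omega) f' (i+4) true c (by omega) (by omega)]
          rw [hc4]
          simp only [scanB]
          rw [if_neg (show ¬ "don't()".toList.isPrefixOf ('d'::'o'::'('::')'::u) = true
                from by rw [← hc4]; exact hb1),
              if_pos (show "do()".toList.isPrefixOf ('d'::'o'::'('::')'::u) = true
                from by rw [← hc4]; exact hb2),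
              show ('d'::'o'::'('::')'::u).drop 4 = u from rfl, hu4]
        · by_cases hb3 : "mul(".toList.isPrefixOf (s.drop i) = true
          · obtain ⟨u4, hu⟩ := List.isPrefixOf_iff_prefix.mp hb3
            have hc4 : s.drop i = 'm'::'u'::'l'::'('::u4 := by rw [← hu]; rfl
            have hulen : u4.length + 4 = k' + 1 := by rw [hc4] at hlenT; simpa using hlenT
            have hu4' : u4 = s.drop (i+4) := by rw [← List.drop_drop, hc4]; rfl
            have h7 : (s.drop i).take 7 = 'm'::'u'::'l'::'('::(u4.take 3) := by rw [hc4]; rfl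
            have h4 : (s.drop i).take 4 = "mul(".toList := by rw [hc4]; rfl
            have h15 : (s.drop i).take 15 = 'm'::'u'::'l'::'('::(u4.take 11) := by rw [hc4]; rfl
            have htl : ('u'::'l'::'('::u4) = s.drop (i+1) := by rw [← List.drop_drop, hc4]; rfl
            rcases hArm : mulArm? u4 with _ | ⟨p, len⟩
            · have hstep : stepN s (a, c) i = (a, c) := by
                cases a <;>
                  simp [stepN, h7, h4, h15, tokDont_eq, tokDo_eq, tokMul_eq, MP u4, hArm]
              rw [List.range'_succ, List.foldl_cons, hstep,
                  ih k' (by omega) f' (i+1) a c (by omega) (by omega)]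
              rw [hc4]
              simp only [scanB]
              rw [if_neg (show ¬ "don't()".toList.isPrefixOf ('m'::'u'::'l'::'('::u4) = true
                    from by rw [← hc4]; exact hb1),
                  if_neg (show ¬ "do()".toList.isPrefixOf ('m'::'u'::'l'::'('::u4) = true
                    from by rw [← hc4]; exact hb2),
                  if_pos (show "mul(".toList.isPrefixOf ('m'::'u'::'l'::'('::u4) = true
                    from by rw [← hc4]; exact hb3),
                  show ('m'::'u'::'l'::'('::u4).drop 4 = u4 from rfl, hArm]
              dsimp only
              rw [htl]
            · obtain ⟨hlenle, hlen1⟩ := mulArm_len hArm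
              have hk : 4 + len ≤ k' + 1 := by omega
              have hstep : stepN s (a, c) i = (a, if a then c + p else c) := by
                cases a <;>
                  simp [stepN, h7, h4, h15, tokDont_eq, tokDo_eq, tokMul_eq, MP u4, hArm]
              have hskip : ('m'::'u'::'l'::'('::u4).drop (4+len) = s.drop (i + (4+len)) := by
                rw [show 4+len = len+4 from by omega, drop_cons4, hu4', List.drop_drop]
                congr 1
                omega
              rw [show k'+1 = (4+len) + (k'+1-(4+len)) from by omega, ← List.range'_append, one_mul,
                  List.foldl_append,
                  show List.range' i (4+len) = i :: List.range' (i+1) (3+len) from by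
                    rw [show 4+len = (3+len)+1 from by omega, List.range'_succ],
                  List.foldl_cons, hstep,
                  fold_span_id s i (3+len) (by
                    intro off cc ho1 ho2 hcc
                    rw [hc4] at hcc
                    by_cases h4' : off < 4
                    · obtain ⟨o, rfl⟩ : ∃ o, off = o + 1 := ⟨off - 1, by omega⟩
                      rw [List.getElem?_cons_succ,
                          show ('u'::'l'::'('::u4) = ['u','l','('] ++ u4 from rfl,
                          List.getElem?_append_left (by simp; omega)] at hcc
                      have hmem := List.mem_of_getElem? hcc
                      simp at hmem
                      rcases hmem with rfl | rfl | rfl <;> exact ⟨by decide, by decide⟩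
                    · rw [show off = (off - 4) + 4 from by omega, getElem?_cons4] at hcc
                      exact mulSpan_safe hArm (off - 4) cc (by omega) hcc),
                  ih (k'+1-(4+len)) (by omega) f' (i+(4+len)) a (if a then c + p else c)
                    (by omega) (by omega)]
              rw [hc4]
              simp only [scanB]
              rw [if_neg (show ¬ "don't()".toList.isPrefixOf ('m'::'u'::'l'::'('::u4) = true
                    from by rw [← hc4]; exact hb1),
                  if_neg (show ¬ "do()".toList.isPrefixOf ('m'::'u'::'l'::'('::u4) = true
                    from by rw [← hc4]; exact hb2),
                  if_pos (show "mul(".toList.isPrefixOf ('m'::'u'::'l'::'('::u4) = true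
                    from by rw [← hc4]; exact hb3),
                  show ('m'::'u'::'l'::'('::u4).drop 4 = u4 from rfl, hArm]
              dsimp only
              rw [hskip]
          · have hdrop : s.drop i = s[i] :: s.drop (i+1) := List.drop_eq_getElem_cons hi
            have n7 : (s.drop i).take 7 ≠ ['d','o','n','\'','t','(',')'] := by
              rw [← tokDont_eq]
              exact fun hEq => hb1 (List.isPrefixOf_iff_prefix.mpr (List.prefix_iff_eq_take.mpr (by
                rw [show ("don't()".toList).length = 7 from rfl]; exact hEq.symm)))
            have n4do : (s.drop i).take 4 ≠ ['d','o','(',')'] := by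
              rw [← tokDo_eq]
              exact fun hEq => hb2 (List.isPrefixOf_iff_prefix.mpr (List.prefix_iff_eq_take.mpr (by
                rw [show ("do()".toList).length = 4 from rfl]; exact hEq.symm)))
            have n4mul : (s.drop i).take 4 ≠ ['m','u','l','('] := by
              rw [← tokMul_eq]
              exact fun hEq => hb3 (List.isPrefixOf_iff_prefix.mpr (List.prefix_iff_eq_take.mpr (by
                rw [show ("mul(".toList).length = 4 from rfl]; exact hEq.symm)))
            have hstep : stepN s (a, c) i = (a, c) := by
              simp [stepN, n7, n4do, n4mul]
            rw [List.range'_succ, List.foldl_cons, hstep,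
                ih k' (by omega) f' (i+1) a c (by omega) (by omega)]
            rw [hdrop] at hb1 hb2 hb3 ⊢
            simp only [scanB]
            rw [if_neg hb1, if_neg hb2, if_neg hb3]

-- A's fold with Int indices and PySem slices is the fold of stepN over range' 0 n
lemma find_muls_eq_fold (text : String) :
    find_muls text =
      (List.foldl (stepN text.toList) (true, 0) (List.range' 0 text.toList.length)).2 := by
  unfold find_muls
  dsimp only
  rw [PySem.List.pyRange_zero_natCast, List.foldl_map, List.range_eq_range']
  have hfun : ∀ (st : Bool × Int) (j : Nat),
      (let active :=
        if PySem.List.slice text.toList (some (j : Int)) (some ((j : Int)+7)) = "don't()".toList then false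
        else if PySem.List.slice text.toList (some (j : Int)) (some ((j : Int)+4)) = "do()".toList then true
        else st.1
       if PySem.List.slice text.toList (some (j : Int)) (some ((j : Int)+4)) = "mul(".toList ∧ active = true then
        (active, st.2 + muls_present (PySem.List.slice text.toList (some (j : Int)) (some ((j : Int)+15))))
       else (active, st.2)) = stepN text.toList st j := by
    intro st j
    have c7 : ((j : Int) + 7) = ((j + 7 : Nat) : Int) := by push_cast; ring
    have c4 : ((j : Int) + 4) = ((j + 4 : Nat) : Int) := by push_cast; ring
    have c15 : ((j : Int) + 15) = ((j + 15 : Nat) : Int) := by push_cast; ring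
    rw [c7, c4, c15, PySem.List.slice_natCast, PySem.List.slice_natCast, PySem.List.slice_natCast,
        Nat.add_sub_cancel_left, Nat.add_sub_cancel_left, Nat.add_sub_cancel_left]
    rfl
  simp only [hfun]

-- ===== VERDICT (by name: the statement is the Claim_ definition above) =====
theorem find_muls_spec : Claim_equal_find_muls := by
  intro text _
  show find_muls text = find_muls_alt text
  rw [find_muls_eq_fold, find_muls_alt,
      scan_fold text.toList text.toList.length text.toList.length 0 true 0 (by omega) le_rfl,
      List.drop_zero]
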